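-- pv_equiv track=rewrite | github.com/cliffpham/algos_dataStructures | algos/loops/find_replace_pattern.py | find
-- ===== SOURCE A (Python) =====
-- def find(pattern):
--     seen = {}
--     s = ''
--     for i in range(len(pattern)):
--         if pattern[i] in seen:
--             s += str(seen[pattern[i]])
--         else:
--            seen[pattern[i]] = i
--            s += str(seen[pattern[i]])
--     return s
-- ===== SOURCE B (Python) =====
-- def find(pattern):
--     n = len(pattern)
--     out = [''] * n
--     for c in set(pattern):
--         ps = [i for i in range(n) if pattern[i] == c]
--         s = str(ps[0])
--         for i in ps:
--             out[i] = s
--     return ''.join(out)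
-- ===== Notes on version B (the rewrite author's own statement) =====
-- stated objective: alternative
-- what changed: Replaced A's left-to-right accumulator with a first-seen dict by an inverted-index scatter: for each distinct character collect all its positions, then write the string of the group's first position into every one of those slots of a pre-sized output buffer, joining at the end (output built out of order; result independent of set iteration order since the groups are disjoint).
import Mathlib
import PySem

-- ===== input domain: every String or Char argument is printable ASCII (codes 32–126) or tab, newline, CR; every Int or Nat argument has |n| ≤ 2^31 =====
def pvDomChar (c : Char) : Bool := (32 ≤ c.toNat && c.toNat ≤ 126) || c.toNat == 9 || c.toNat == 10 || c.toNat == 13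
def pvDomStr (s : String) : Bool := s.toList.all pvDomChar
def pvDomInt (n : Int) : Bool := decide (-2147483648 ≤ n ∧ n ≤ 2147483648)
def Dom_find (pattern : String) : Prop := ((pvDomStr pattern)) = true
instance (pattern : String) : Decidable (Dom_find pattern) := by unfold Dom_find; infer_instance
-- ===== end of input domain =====

-- B replaces A's left-to-right first-seen-dict accumulator with an inverted-index scatter:
-- for each distinct character it collects all its positions and writes the string of the
-- group's first position into those slots of a pre-sized buffer, joining at the end
-- (alternative decomposition; the groups are disjoint, so the set's iteration order is immaterial).

-- ===== PORT A =====
-- loop body of A: one step of 'for i in range(len(pattern))'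
def findStep (cs : List Char) (st : PySem.Dict Char Int × List Char) (i : Int) :
    PySem.Dict Char Int × List Char :=
  let c := PySem.List.pyGetD cs i ' '
  if st.1.contains c then
    (st.1, st.2 ++ PySem.Int.toChars (st.1.getD c 0))
  else
    let d := st.1.insert c i
    (d, st.2 ++ PySem.Int.toChars (d.getD c 0))

def find (pattern : String) : String :=
  let cs := pattern.toList
  let st := (PySem.List.pyRange 0 (PySem.Str.len pattern) 1).foldl (findStep cs)
    (PySem.Dict.empty, [])
  String.ofList st.2

-- ===== PORT B =====
-- one iteration of B's 'for c in set(pattern)': collect c's positions, scatter str(first) into them.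
-- 'range(n)' indices are 0 ≤ i < n, so 'pattern[i]' is ported as getD and 'out[i] = s' as set (exact);
-- 'ps[0]' is ported with a default as headD — ps is nonempty for every c of set(pattern).
def findScatter (cs : List Char) (out : List (List Char)) (c : Char) : List (List Char) :=
  let ps := (List.range cs.length).filter (fun i => cs.getD i ' ' == c)
  let s := PySem.Int.toChars ((ps.headD 0 : Nat) : Int)
  ps.foldl (fun o i => o.set i s) out

def find_alt (pattern : String) : String :=
  let cs := pattern.toList
  let out := (PySem.Set.ofList cs).foldl (findScatter cs)
    (List.replicate cs.length ([] : List Char))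
  String.ofList (PySem.Chars.join [] out)

-- ===== PRECONDITION & SPEC =====
def Spec_find (pattern : String) (out : String) : Prop := out = find_alt pattern
instance (pattern : String) (out : String) : Decidable (Spec_find pattern out) := by unfold Spec_find; infer_instance

-- ===== CLAIM (what is proved, stated in full; the proofs are below) =====
def Claim_equal_find : Prop := ∀ (pattern : String), Dom_find pattern → Spec_find pattern (find pattern)

-- ===== LEMMAS AND PROOFS =====

-- the common value both programs emit at a position holding character c
def firstStr (cs : List Char) (c : Char) : List Char :=
  PySem.Int.toChars (((PySem.List.index? cs c).getD 0 : Nat) : Int)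

-- ''.join(parts) is flatten
theorem join_nil_flatten (l : List (List Char)) : PySem.Chars.join [] l = l.flatten := by
  simp only [PySem.Chars.join, List.intercalate]
  induction l with
  | nil => simp
  | cons x t ih =>
    cases t with
    | nil => simp
    | cons y u => simp_all [List.intersperse]

-- ================= A side: loop invariant =================
-- after processing the prefix 'pre', the dict maps exactly the characters of 'pre' to their
-- first-occurrence index in cs, and the rest of the loop appends firstStr for each remaining char.
theorem find_loop_inv (cs : List Char) (rest : List Char) : ∀ (pre : List Char)
    (d : PySem.Dict Char Int) (s : List Char),
    cs = pre ++ rest →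
    (∀ c, d.get? c =
      if c ∈ pre then some (((PySem.List.index? cs c).getD 0 : Nat) : Int) else none) →
    ∃ d', (PySem.List.pyRange (pre.length : Int) (cs.length : Int) 1).foldl (findStep cs) (d, s)
      = (d', s ++ (rest.map (firstStr cs)).flatten) := by
  induction rest with
  | nil =>
    intro pre d s hcs hd
    subst hcs
    rw [PySem.List.pyRange_one_eq_nil (by simp)]
    exact ⟨d, by simp⟩
  | cons c rest' ih =>
    intro pre d s hcs hd
    have hlt : (pre.length : Int) < ((cs.length : Nat) : Int) := by
      subst hcs; simp
    rw [PySem.List.pyRange_one_cons hlt, List.foldl_cons]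
    have hget : PySem.List.pyGetD cs (pre.length : Int) ' ' = c := by
      subst hcs
      rw [PySem.List.pyGetD_natCast]
      simp [List.getD]
    by_cases hc : c ∈ pre
    · -- character seen before: dict unchanged, stored first index appended
      have hcont : d.contains c = true := by
        rw [PySem.Dict.contains_eq_isSome_get?, hd c, if_pos hc]; rfl
      have hstep : findStep cs (d, s) (pre.length : Int)
          = (d, s ++ firstStr cs c) := by
        simp only [findStep, hget, hcont, if_pos]
        have : d.getD c 0 = (((PySem.List.index? cs c).getD 0 : Nat) : Int) := by
          simp [PySem.Dict.getD_eq_get?_getD, hd c, if_pos hc]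
        rw [this]; rfl
      rw [hstep]
      have hcs' : cs = (pre ++ [c]) ++ rest' := by simpa using hcs
      obtain ⟨d', hfold⟩ := ih (pre ++ [c]) d _ hcs' (by
        intro c'
        rw [hd c']
        by_cases h' : c' ∈ pre ++ [c]
        · rw [if_pos h']
          rcases List.mem_append.1 h' with h2 | h2
          · rw [if_pos h2]
          · simp at h2; subst h2; rw [if_pos hc]
        · rw [if_neg h', if_neg (fun h2 => h' (List.mem_append.2 (Or.inl h2)))])
      refine ⟨d', ?_⟩
      have hlen : ((pre ++ [c]).length : Int) = (pre.length : Int) + 1 := by simp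
      rw [← hlen, hfold]
      simp
    · -- new character: stored index is the current position = first occurrence in cs
      have hcont : d.contains c = false := by
        rw [PySem.Dict.contains_eq_isSome_get?, hd c, if_neg hc]; rfl
      have hidx : PySem.List.index? cs c = some pre.length := by
        have : cs = (pre ++ [c]) ++ rest' := by simpa using hcs
        rw [this, PySem.List.index?_append_of_mem _ (by simp),
            PySem.List.index?_append_singleton_self pre c hc]
      have hstep : findStep cs (d, s) (pre.length : Int)
          = (d.insert c (pre.length : Int), s ++ firstStr cs c) := by
        simp only [findStep, hget, hcont, Bool.false_eq_true, if_false]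
        rw [PySem.Dict.getD_insert_self]
        simp only [firstStr, hidx, Option.getD_some]
      rw [hstep]
      have hcs' : cs = (pre ++ [c]) ++ rest' := by simpa using hcs
      obtain ⟨d', hfold⟩ := ih (pre ++ [c]) (d.insert c (pre.length : Int)) _ hcs' (by
        intro c'
        by_cases h2 : c' = c
        · subst h2
          rw [PySem.Dict.get?_insert_self, if_pos (by simp), hidx]
          rfl
        · rw [PySem.Dict.get?_insert_of_ne _ _ h2, hd c']
          by_cases h3 : c' ∈ pre
          · rw [if_pos h3, if_pos (List.mem_append.2 (Or.inl h3))]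
          · rw [if_neg h3, if_neg (by simp [h2, h3])])
      refine ⟨d', ?_⟩
      have hlen : ((pre ++ [c]).length : Int) = (pre.length : Int) + 1 := by simp
      rw [← hlen, hfold]
      simp

theorem find_eq_map (pattern : String) :
    find pattern = String.ofList ((pattern.toList.map (firstStr pattern.toList)).flatten) := by
  unfold find
  obtain ⟨d', hfold⟩ := find_loop_inv pattern.toList pattern.toList [] PySem.Dict.empty []
    (by simp) (by intro c; simp [PySem.Dict.get?_empty])
  simp only [PySem.Str.len_eq] at *
  rw [show (0 : Int) = (([] : List Char).length : Int) by simp] at *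
  rw [hfold]
  simp

-- ================= B side: the scatter =================

-- the filtered index list is exactly the positions of c
theorem mem_posFilter (cs : List Char) (c : Char) (j : Nat) :
    j ∈ (List.range cs.length).filter (fun i => cs.getD i ' ' == c) ↔
      j < cs.length ∧ cs.getD j ' ' = c := by
  simp [List.mem_filter, List.mem_range]

-- the head of the position list is the first-occurrence index (0 when absent on both sides)
theorem head_posFilter (cs : List Char) (c : Char) :
    ((List.range cs.length).filter (fun i => cs.getD i ' ' == c)).headD 0
      = (PySem.List.index? cs c).getD 0 := by
  induction cs with
  | nil => simp [PySem.List.index?_eq_idxOf?]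
  | cons a t ih =>
    rw [List.length_cons, List.range_succ_eq_map, List.filter_cons]
    have hmap : (List.filter (fun i => List.getD (a :: t) i ' ' == c)
        (List.map (· + 1) (List.range t.length)))
        = List.map (· + 1) (List.filter (fun i => List.getD t i ' ' == c) (List.range t.length)) := by
      rw [List.filter_map]
      rfl
    by_cases h : a = c
    · subst h
      rw [PySem.List.index?_cons_self]
      simp
    · rw [PySem.List.index?_cons_of_ne _ (by simpa using h)]
      have hne : ((List.getD (a :: t) 0 ' ' == c) = false) := by simpa using h
      rw [hne, if_neg (by simp), hmap]
      rcases hfe : List.filter (fun i => List.getD t i ' ' == c) (List.range t.length) with _ | ⟨x, l⟩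
      · have hnone : PySem.List.index? t c = none := by
          rw [PySem.List.index?_eq_none_iff]
          intro hmem
          obtain ⟨i, hi, hgi⟩ := List.mem_iff_getElem.1 hmem
          have : i ∈ List.filter (fun i => List.getD t i ' ' == c) (List.range t.length) := by
            rw [List.mem_filter, List.mem_range]
            exact ⟨hi, by simp [List.getD_eq_getElem?_getD, List.getElem?_eq_getElem hi, hgi]⟩
          rw [hfe] at this; simp at this
        rw [PySem.List.index?_eq_idxOf?] at hnone
        simp [hnone]
      · rcases hix : PySem.List.index? t c with _ | k
        · rw [PySem.List.index?_eq_none_iff] at hix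
          exfalso
          have hx : x ∈ List.filter (fun i => List.getD t i ' ' == c) (List.range t.length) := by
            rw [hfe]; simp
          rw [List.mem_filter, List.mem_range] at hx
          obtain ⟨hxlt, hxeq⟩ := hx
          rw [beq_iff_eq, List.getD_eq_getElem?_getD, List.getElem?_eq_getElem hxlt] at hxeq
          exact hix (hxeq ▸ List.getElem_mem hxlt)
        · have hh := ih
          rw [hfe, hix] at hh
          simp only [List.headD_cons, Option.getD_some] at hh
          simp [hh]

-- scatter preserves length
theorem scatter_length {α : Type} (s : α) (ps : List Nat) (out : List α) :
    (ps.foldl (fun o i => o.set i s) out).length = out.length := by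
  induction ps generalizing out with
  | nil => rfl
  | cons p ps ih => simp [List.foldl_cons, ih]

-- the scatter writes s exactly at the in-range positions of ps
theorem scatter_get {α : Type} (s : α) (ps : List Nat) (out : List α) (j : Nat) :
    (ps.foldl (fun o i => o.set i s) out)[j]?
      = if j ∈ ps ∧ j < out.length then some s else out[j]? := by
  induction ps generalizing out with
  | nil => simp
  | cons p ps ih =>
    rw [List.foldl_cons, ih, List.length_set, List.getElem?_set]
    by_cases hj : j < out.length
    · by_cases hmem : j ∈ ps
      · simp [hj, hmem]
      · by_cases hp : p = j
        · subst hp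
          simp [hj, hmem]
        · have hp' : j ≠ p := fun h => hp h.symm
          simp [hj, hmem, hp, hp']
    · have h1 : ¬ (j ∈ ps ∧ j < out.length) := fun h => hj h.2
      have h2 : ¬ (j ∈ p :: ps ∧ j < out.length) := fun h => hj h.2
      rw [if_neg h1, if_neg h2]
      by_cases hp : p = j
      · rw [if_pos hp, if_neg (by omega : ¬ p < out.length),
            List.getElem?_eq_none (by omega : out.length ≤ j)]
      · rw [if_neg hp]

-- one scatter step, read back at a position j < |cs|
theorem findScatter_get (cs : List Char) (out : List (List Char))
    (hlen : out.length = cs.length) (c : Char) (j : Nat) (hj : j < cs.length) :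
    (findScatter cs out c)[j]?
      = if cs.getD j ' ' = c then some (firstStr cs c) else out[j]? := by
  simp only [findScatter]
  rw [scatter_get, head_posFilter]
  by_cases h : cs.getD j ' ' = c
  · rw [if_pos ⟨(mem_posFilter cs c j).2 ⟨hj, h⟩, by omega⟩, if_pos h]
    rfl
  · rw [if_neg (fun hco => h ((mem_posFilter cs c j).1 hco.1).2), if_neg h]

theorem findScatter_length (cs : List Char) (out : List (List Char)) (c : Char) :
    (findScatter cs out c).length = out.length := by
  unfold findScatter; exact scatter_length _ _ _

-- folding scatter steps over any list D of characters
theorem fold_scatter_get (cs : List Char) (D : List Char) :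
    ∀ (out : List (List Char)), out.length = cs.length → ∀ (j : Nat), j < cs.length →
    (D.foldl (findScatter cs) out)[j]?
      = if cs.getD j ' ' ∈ D then some (firstStr cs (cs.getD j ' ')) else out[j]? := by
  induction D with
  | nil => intro out _ j _; simp
  | cons c D' ih =>
    intro out hlen j hj
    rw [List.foldl_cons, ih _ (by rw [findScatter_length, hlen]) j hj]
    by_cases h1 : cs.getD j ' ' ∈ D'
    · rw [if_pos h1, if_pos (List.mem_cons_of_mem c h1)]
    · rw [if_neg h1, findScatter_get cs out hlen c j hj]
      by_cases h2 : cs.getD j ' ' = c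
      · rw [if_pos h2, if_pos (by rw [h2]; exact List.mem_cons_self), h2]
      · rw [if_neg h2,
           if_neg (fun hmem => (List.mem_cons.1 hmem).elim h2 h1)]

theorem fold_scatter_length (cs : List Char) (D : List Char) (out : List (List Char)) :
    (D.foldl (findScatter cs) out).length = out.length := by
  induction D generalizing out with
  | nil => rfl
  | cons c D' ih => rw [List.foldl_cons, ih, findScatter_length]

theorem alt_out_eq_map (cs : List Char) :
    (PySem.Set.ofList cs).foldl (findScatter cs) (List.replicate cs.length ([] : List Char))
      = cs.map (firstStr cs) := by
  apply List.ext_getElem?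
  intro j
  by_cases hj : j < cs.length
  · rw [fold_scatter_get cs _ _ (by simp) j hj]
    have hmem : cs.getD j ' ' ∈ PySem.Set.ofList cs := by
      rw [PySem.Set.mem_ofList]
      rw [List.getD_eq_getElem?_getD, List.getElem?_eq_getElem hj]
      simp
    rw [if_pos hmem, List.getElem?_map, List.getElem?_eq_getElem hj]
    rw [List.getD_eq_getElem?_getD, List.getElem?_eq_getElem hj]
    rfl
  · rw [List.getElem?_eq_none (by rw [fold_scatter_length]; simpa using not_lt.1 hj),
        List.getElem?_eq_none (by simpa using not_lt.1 hj)]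

theorem find_eq_alt (pattern : String) : find pattern = find_alt pattern := by
  rw [find_eq_map]
  show _ = String.ofList (PySem.Chars.join []
    ((PySem.Set.ofList pattern.toList).foldl (findScatter pattern.toList)
      (List.replicate pattern.toList.length ([] : List Char))))
  rw [alt_out_eq_map, join_nil_flatten]

-- ===== VERDICT (by name: the statement is the Claim_ definition above) =====
theorem find_spec : Claim_equal_find := by
  intro p _
  exact find_eq_alt p
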